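-- pv_equiv track=rewrite | github.com/Aditya-a404a/Codeforces-1 | C_Coin_Rows.py | check
-- ===== SOURCE A (Python) =====
-- def check(a,b):
--
--     s = sum(a)
--     s1 = 0
--     ans = 2**32
--     worst = 0
--
--     for i in range(len(a)):
--         s-=a[i]
--         worst = max(s,s1)
--         ans = min(ans,worst)
--         s1+=b[i]
--     return ans
--
--
--     pass
-- ===== SOURCE B (Python) =====
-- def _prefix_sums(xs):
--     out = [0]
--     for x in xs:
--         out.append(out[-1] + x)
--     return out
--
--
-- def check(a, b):
--     n = len(a)
--     pb = _prefix_sums(b[:n])            # pb[i] = sum(b[:i])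
--     sa = _prefix_sums(a[::-1])[::-1]    # sa[i] = sum(a[i:])
--     ans = 2 ** 32
--     for i in range(n):
--         ans = min(ans, max(sa[i + 1], pb[i]))
--     return ans
-- ===== Notes on version B (the rewrite author's own statement) =====
-- stated objective: alternative
-- what changed: Replaces A's single interleaved running-sum loop (mutable s, s1, worst, ans) with two precomputed tables (prefix sums of b, suffix sums of a) combined by one stateless min/max pass.
import Mathlib
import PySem

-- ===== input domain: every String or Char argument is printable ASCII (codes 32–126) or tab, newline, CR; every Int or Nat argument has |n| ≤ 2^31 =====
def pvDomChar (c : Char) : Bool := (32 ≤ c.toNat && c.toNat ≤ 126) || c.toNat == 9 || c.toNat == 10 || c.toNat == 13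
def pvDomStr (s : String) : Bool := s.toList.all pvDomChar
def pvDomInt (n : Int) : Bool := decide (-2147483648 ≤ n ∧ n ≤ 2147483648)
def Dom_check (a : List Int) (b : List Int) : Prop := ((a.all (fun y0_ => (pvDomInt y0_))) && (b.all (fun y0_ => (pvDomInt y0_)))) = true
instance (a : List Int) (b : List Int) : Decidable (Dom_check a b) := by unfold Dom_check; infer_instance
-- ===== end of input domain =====

-- B precomputes prefix sums of b and suffix sums of a as tables and combines them in
-- one stateless pass, instead of A's interleaved running-sum loop. Objective: alternative.

-- ===== PORT A =====
-- for i in range(len(a)): s -= a[i]; worst = max(s, s1); ans = min(ans, worst); s1 += b[i]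
-- state = (s, s1, ans); indices are in range under Pre_check, so getD is exact.
def check (a : List Int) (b : List Int) : Int :=
  (((List.range a.length).foldl
      (fun (st : Int × Int × Int) i =>
        let s := st.1 - a.getD i 0
        let worst := max s st.2.1
        let ans := min st.2.2 worst
        (s, st.2.1 + b.getD i 0, ans))
      (a.sum, 0, 2 ^ 32))).2.2

-- ===== PORT B =====
-- _prefix_sums: out = [0]; for x in xs: out.append(out[-1] + x)  (running total carried)
def prefixSumsAux : Int → List Int → List Int
  | s, [] => [s]
  | s, x :: xs => s :: prefixSumsAux (s + x) xs

def prefixSums (xs : List Int) : List Int := prefixSumsAux 0 xs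

def check_alt (a : List Int) (b : List Int) : Int :=
  let n := a.length
  let pb := prefixSums (b.take n)
  let sa := (prefixSums a.reverse).reverse
  (List.range n).foldl (fun ans i => min ans (max (sa.getD (i + 1) 0) (pb.getD i 0))) (2 ^ 32)

-- ===== PRECONDITION & SPEC =====
-- A raises IndexError on b[i] when len(b) < len(a); exactly those inputs are excluded.
def Pre_check (a : List Int) (b : List Int) : Prop := a.length ≤ b.length
instance (a : List Int) (b : List Int) : Decidable (Pre_check a b) := by unfold Pre_check; infer_instance
def pvWitness_check : List Int × List Int := ([1, 2], [3, 4])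

def Spec_check (a : List Int) (b : List Int) (out : Int) : Prop := out = check_alt a b
instance (a : List Int) (b : List Int) (out : Int) : Decidable (Spec_check a b out) := by unfold Spec_check; infer_instance

-- ===== CLAIM (what is proved, stated in full; the proofs are below) =====
def Claim_equal_check : Prop := ∀ (a : List Int) (b : List Int), Dom_check a b → Pre_check a b → Spec_check a b (check a b)

-- ===== LEMMAS AND PROOFS =====

theorem prefixSumsAux_length (s : Int) (xs : List Int) :
    (prefixSumsAux s xs).length = xs.length + 1 := by
  induction xs generalizing s with
  | nil => rfl
  | cons x xs ih => simp [prefixSumsAux, ih]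

theorem prefixSumsAux_getD (s : Int) (xs : List Int) (i : ℕ) (hi : i ≤ xs.length) :
    (prefixSumsAux s xs).getD i 0 = s + (xs.take i).sum := by
  induction xs generalizing s i with
  | nil =>
    cases Nat.le_zero.mp hi
    simp [prefixSumsAux]
  | cons x xs ih =>
    cases i with
    | zero => simp [prefixSumsAux]
    | succ i =>
      simp only [prefixSumsAux, List.getD_cons_succ, List.take_succ_cons,
        List.sum_cons]
      rw [ih (s + x) i (by simpa using hi)]
      ring

theorem prefixSums_getD (xs : List Int) (i : ℕ) (hi : i ≤ xs.length) :
    (prefixSums xs).getD i 0 = (xs.take i).sum := by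
  simpa using prefixSumsAux_getD 0 xs i hi

-- suffix-sum table: sa.getD i 0 = (a.drop i).sum for i ≤ a.length
theorem sa_getD (a : List Int) (i : ℕ) (hi : i ≤ a.length) :
    ((prefixSums a.reverse).reverse).getD i 0 = (a.drop i).sum := by
  have hlen : (prefixSums a.reverse).length = a.length + 1 := by
    simpa using prefixSumsAux_length 0 a.reverse
  have hi' : i < (prefixSums a.reverse).length := by omega
  rw [List.getD_eq_getElem?_getD, List.getElem?_reverse (by simpa using hi')]
  have h2 : (prefixSums a.reverse).length - 1 - i = a.length - i := by omega
  rw [h2, ← List.getD_eq_getElem?_getD,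
    prefixSums_getD a.reverse (a.length - i) (by simp)]
  rw [List.take_reverse, List.sum_reverse]
  rw [Nat.sub_sub_self hi]

theorem drop_sum_succ (a : List Int) (m : ℕ) (hm : m < a.length) :
    (a.drop (m + 1)).sum = (a.drop m).sum - a.getD m 0 := by
  have h := List.drop_eq_getElem_cons hm
  rw [List.getD_eq_getElem?_getD, List.getElem?_eq_getElem hm, Option.getD_some, h,
    List.sum_cons]
  ring

theorem take_sum_succ (b : List Int) (m : ℕ) (hm : m < b.length) :
    (b.take (m + 1)).sum = (b.take m).sum + b.getD m 0 := by
  rw [List.getD_eq_getElem?_getD, List.getElem?_eq_getElem hm, Option.getD_some,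
    List.sum_take_succ b m hm]

-- main invariant: after m steps, A's state is (suffix sum, prefix sum, B-style running min)
theorem main_inv (a b : List Int) (hab : a.length ≤ b.length) (m : ℕ) (hm : m ≤ a.length) :
    (List.range m).foldl
      (fun (st : Int × Int × Int) i =>
        let s := st.1 - a.getD i 0
        let worst := max s st.2.1
        let ans := min st.2.2 worst
        (s, st.2.1 + b.getD i 0, ans))
      (a.sum, 0, 2 ^ 32)
    = ((a.drop m).sum, (b.take m).sum,
        (List.range m).foldl
          (fun ans i => min ans (max ((a.drop (i + 1)).sum) ((b.take i).sum))) (2 ^ 32)) := by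
  induction m with
  | zero => simp
  | succ m ih =>
    have hm' : m ≤ a.length := by omega
    have hma : m < a.length := by omega
    have hmb : m < b.length := by omega
    rw [List.range_succ, List.foldl_append, List.foldl_append, ih hm']
    simp only [List.foldl_cons, List.foldl_nil]
    rw [drop_sum_succ a m hma, take_sum_succ b m hmb]

-- ===== VERDICT (by name: the statement is the Claim_ definition above) =====
theorem check_spec : Claim_equal_check := by
  intro a b _ hpre
  have hpre' : a.length ≤ b.length := hpre
  unfold Spec_check check check_alt
  rw [main_inv a b hpre a.length le_rfl]
  simp only
  refine (PySem.List.foldl_congr_mem _ _ _ _ ?_).symm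
  intro ans i hi
  have hi' : i < a.length := List.mem_range.mp hi
  rw [sa_getD a (i + 1) (by omega),
    prefixSums_getD (b.take a.length) i (by simp; omega),
    List.take_take, Nat.min_eq_left (Nat.le_of_lt hi')]
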